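-- pv_equiv track=rewrite | github.com/Mareantz/Laboratoare-Python-24 | Lab02/probleme_simple/P6.py | text_to_hex
-- ===== SOURCE A (Python) =====
-- def text_to_hex(s: str) -> str:
--     output = ""
--     for ch in s:
--         if ch == " ":
--             output += "\n"
--         else:
--             output += format(ord(ch), 'x')
--     return output
-- ===== SOURCE B (Python) =====
-- def text_to_hex(s: str) -> str:
--     return "\n".join(
--         "".join(format(ord(c), 'x') for c in seg)
--         for seg in s.split(" ")
--     )
-- ===== Notes on version B (the rewrite author's own statement) =====
-- stated objective: idiomatic
-- what changed: Replaces the per-character loop with a space-branch and string accumulator by a partition-then-map decomposition: split the string on single spaces, hex-encode each segment, and join the encoded segments with newline separators.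
import Mathlib
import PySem

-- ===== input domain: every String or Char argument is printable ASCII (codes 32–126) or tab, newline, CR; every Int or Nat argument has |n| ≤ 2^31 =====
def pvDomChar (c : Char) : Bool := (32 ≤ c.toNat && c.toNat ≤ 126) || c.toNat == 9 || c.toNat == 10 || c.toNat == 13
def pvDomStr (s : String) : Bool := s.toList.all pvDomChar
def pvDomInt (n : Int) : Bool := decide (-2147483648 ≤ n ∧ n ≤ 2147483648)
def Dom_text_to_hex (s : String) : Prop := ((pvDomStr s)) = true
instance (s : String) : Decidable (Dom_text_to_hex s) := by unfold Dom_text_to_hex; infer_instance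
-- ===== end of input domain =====

-- B replaces A's per-character branch-and-append loop by split-on-space / hex-each-segment / join-with-newline (idiomatic decomposition).

-- format(n, 'x') for a nonnegative n (both Pythons call it on ord(ch)); exact lowercase hex, no prefix
def pyHex (n : Nat) : List Char := Nat.toDigits 16 n

-- ===== PORT A =====
def text_to_hex (s : String) : String :=
  String.mk (s.toList.foldl
    (fun output ch => if ch = ' ' then output ++ ['\n'] else output ++ pyHex ch.toNat) [])

-- ===== PORT B =====
-- "".join(format(ord(c),'x') for c in seg)
def segHex (seg : List Char) : List Char := seg.flatMap (fun c => pyHex c.toNat)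

def text_to_hex_alt (s : String) : String :=
  String.mk (PySem.Chars.join ['\n'] ((List.splitOn ' ' s.toList).map segHex))

-- ===== PRECONDITION & SPEC =====
def Spec_text_to_hex (s : String) (out : String) : Prop := out = text_to_hex_alt s
instance (s : String) (out : String) : Decidable (Spec_text_to_hex s out) := by unfold Spec_text_to_hex; infer_instance

-- ===== CLAIM (what is proved, stated in full; the proofs are below) =====
def Claim_equal_text_to_hex : Prop := ∀ (s : String), Dom_text_to_hex s → Spec_text_to_hex s (text_to_hex s)

-- ===== LEMMAS AND PROOFS =====

theorem splitOnP_ne_nil' (p : Char → Bool) (cs : List Char) : List.splitOnP p cs ≠ [] := by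
  induction cs with
  | nil => simp [List.splitOnP, List.splitOnP.go]
  | cons c cs ih =>
    rw [List.splitOnP_cons]
    split
    · simp
    · intro h
      exact ih (List.modifyHead_eq_nil_iff.mp h)

theorem join_prepend (sep w h : List Char) (t : List (List Char)) :
    PySem.Chars.join sep ((w ++ h) :: t) = w ++ PySem.Chars.join sep (h :: t) := by
  cases t with
  | nil => simp [PySem.Chars.join_singleton]
  | cons y ys =>
    rw [PySem.Chars.join_cons_cons, PySem.Chars.join_cons_cons]
    simp

theorem gfun_space (cs : List Char) :
    PySem.Chars.join ['\n'] ((List.splitOn ' ' (' ' :: cs)).map segHex)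
      = '\n' :: PySem.Chars.join ['\n'] ((List.splitOn ' ' cs).map segHex) := by
  have hne := splitOnP_ne_nil' (fun x => x == ' ') cs
  rw [List.splitOn, List.splitOnP_cons]
  simp only [beq_self_eq_true, if_true]
  obtain ⟨h, t, hs⟩ := List.exists_cons_of_ne_nil hne
  rw [hs]
  rw [List.map_cons, List.map_cons, PySem.Chars.join_cons_cons]
  rw [List.splitOn, hs, List.map_cons]
  simp [segHex]

theorem gfun_char (c : Char) (cs : List Char) (hc : ¬ c = ' ') :
    PySem.Chars.join ['\n'] ((List.splitOn ' ' (c :: cs)).map segHex)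
      = pyHex c.toNat ++ PySem.Chars.join ['\n'] ((List.splitOn ' ' cs).map segHex) := by
  have hne := splitOnP_ne_nil' (fun x => x == ' ') cs
  obtain ⟨h, t, hs⟩ := List.exists_cons_of_ne_nil hne
  rw [List.splitOn, List.splitOnP_cons]
  have hcb : (c == ' ') = false := by simp [hc]
  rw [hcb]
  simp only [Bool.false_eq_true, if_false, hs, List.modifyHead_cons, List.map_cons]
  rw [show segHex (c :: h) = pyHex c.toNat ++ segHex h by simp [segHex]]
  rw [join_prepend, List.splitOn, hs, List.map_cons]

theorem loop_eq (cs : List Char) (acc : List Char) :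
    cs.foldl (fun output ch => if ch = ' ' then output ++ ['\n'] else output ++ pyHex ch.toNat) acc
      = acc ++ PySem.Chars.join ['\n'] ((List.splitOn ' ' cs).map segHex) := by
  induction cs generalizing acc with
  | nil => simp [List.splitOn, List.splitOnP, List.splitOnP.go, PySem.Chars.join_singleton, segHex]
  | cons c cs ih =>
    by_cases hc : c = ' '
    · subst hc
      rw [List.foldl_cons, if_pos rfl, ih, gfun_space]
      simp
    · rw [List.foldl_cons, if_neg hc, ih, gfun_char c cs hc]
      simp

-- ===== VERDICT (by name: the statement is the Claim_ definition above) =====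
theorem text_to_hex_spec : Claim_equal_text_to_hex := by
  intro s _
  unfold Spec_text_to_hex text_to_hex text_to_hex_alt
  rw [loop_eq]
  simp
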